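-- pv_equiv track=rewrite | github.com/gabriellaec/desoft-analise-exercicios | backup/user_321/ch130_2020_04_01_17_09_21_372299.py | monta_mala
-- ===== SOURCE A (Python) =====
-- def monta_mala(l):
--     i = 0
--     mala = []
--     while i in range(len(l)):
--         if l == []:
--             break
--         elif sum(mala) + l[i] <= 23:
--             mala.append(l[i])
--             i +=1
--         else:
--             break
--     return mala
-- ===== SOURCE B (Python) =====
-- from itertools import accumulate
--
-- def monta_mala(l):
--     prefixes = list(accumulate(l))
--     for i, s in enumerate(prefixes):
--         if s > 23:
--             return l[:i]
--     return l[:]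
-- ===== Notes on version B (the rewrite author's own statement) =====
-- stated objective: alternative
-- what changed: Replaces the index-driven decision loop that re-sums mala and appends item by item with a prefix-sum table built by itertools.accumulate followed by a scan for the first prefix over 23 and a single slice.
import Mathlib
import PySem

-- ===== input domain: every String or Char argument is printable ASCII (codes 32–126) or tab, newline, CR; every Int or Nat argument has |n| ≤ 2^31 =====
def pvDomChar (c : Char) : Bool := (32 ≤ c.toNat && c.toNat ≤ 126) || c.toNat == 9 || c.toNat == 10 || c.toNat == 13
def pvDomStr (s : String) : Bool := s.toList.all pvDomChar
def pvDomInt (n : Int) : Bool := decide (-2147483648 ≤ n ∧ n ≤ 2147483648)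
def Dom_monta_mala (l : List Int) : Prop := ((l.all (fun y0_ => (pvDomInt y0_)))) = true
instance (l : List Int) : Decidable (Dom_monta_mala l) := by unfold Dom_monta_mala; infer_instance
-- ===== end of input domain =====

-- B builds the prefix-sum table first and slices at the first prefix over 23, instead of A's append-in-a-decision-loop (alternative decomposition).


-- ===== PORT A =====
-- A's while loop: i and mala advance in lockstep (i = mala.length, the unvisited
-- suffix is `rest`); each step re-tests sum(mala) + l[i] <= 23, appends and
-- advances, or breaks. The `l == []` break is unreachable once the range test
-- passed, kept as the dead first branch here.
def montaMalaLoop (mala : List Int) (rest : List Int) : List Int :=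
  match rest with
  | [] => mala                                   -- i not in range(len(l))
  | x :: xs =>
      if mala.sum + x ≤ 23 then montaMalaLoop (mala ++ [x]) xs
      else mala                                  -- break

def monta_mala (l : List Int) : List Int := montaMalaLoop [] l

-- ===== PORT B =====
-- itertools.accumulate: running prefix sums starting from s
def prefixSums (s : Int) : List Int → List Int
  | [] => []
  | x :: xs => (s + x) :: prefixSums (s + x) xs

-- index of the first prefix sum exceeding 23 (enumerate + the for loop in Source B)
def firstOver23 : List Int → Nat → Option Nat
  | [], _ => none
  | p :: ps, i => if p > 23 then some i else firstOver23 ps (i + 1)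

def monta_mala_alt (l : List Int) : List Int :=
  match firstOver23 (prefixSums 0 l) 0 with
  | some i => l.take i
  | none => l

-- ===== PRECONDITION & SPEC =====
def Spec_monta_mala (l : List Int) (out : List Int) : Prop := out = monta_mala_alt l
instance (l : List Int) (out : List Int) : Decidable (Spec_monta_mala l out) := by unfold Spec_monta_mala; infer_instance

-- ===== CLAIM (what is proved, stated in full; the proofs are below) =====
def Claim_equal_monta_mala : Prop := ∀ (l : List Int), Dom_monta_mala l → Spec_monta_mala l (monta_mala l)

-- ===== LEMMAS AND PROOFS =====

-- B's scan result with an arbitrary starting prefix sum, as a function of the rest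
def sliceFrom (s : Int) (rest : List Int) : List Int :=
  match firstOver23 (prefixSums s rest) 0 with
  | some i => rest.take i
  | none => rest

theorem firstOver23_shift (ps : List Int) (i : Nat) :
    firstOver23 ps (i + 1) = Option.map (· + 1) (firstOver23 ps i) := by
  induction ps generalizing i with
  | nil => rfl
  | cons p ps ih =>
      simp only [firstOver23]
      split_ifs with h
      · rfl
      · exact ih (i + 1)

theorem sliceFrom_cons (s x : Int) (xs : List Int) :
    sliceFrom s (x :: xs) =
      if s + x ≤ 23 then x :: sliceFrom (s + x) xs else [] := by
  simp only [sliceFrom, prefixSums, firstOver23]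
  by_cases h : s + x ≤ 23
  · rw [if_neg (by omega), if_pos h, firstOver23_shift]
    cases firstOver23 (prefixSums (s + x) xs) 0 <;> simp
  · rw [if_pos (by omega), if_neg h]; rfl

theorem montaMalaLoop_eq (rest mala : List Int) :
    montaMalaLoop mala rest = mala ++ sliceFrom mala.sum rest := by
  induction rest generalizing mala with
  | nil => simp [montaMalaLoop, sliceFrom, prefixSums, firstOver23]
  | cons x xs ih =>
      simp only [montaMalaLoop, sliceFrom_cons]
      split_ifs with h
      · rw [ih (mala ++ [x])]
        simp
      · simp

-- ===== VERDICT (by name: the statement is the Claim_ definition above) =====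
theorem monta_mala_spec : Claim_equal_monta_mala := by
  intro l _
  unfold Spec_monta_mala monta_mala monta_mala_alt
  rw [montaMalaLoop_eq]
  simp [sliceFrom]
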